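-- pv_equiv track=rewrite | github.com/AndrewBoney/advent_of_code | 2024/9/solver.py | get_dots
-- ===== SOURCE A (Python) =====
-- def count_dots_recursive(block, count):
--     if len(block) <= 0:
--         return count
--     elif block[0] == ".":
--         count += 1
--         return count_dots_recursive(block[1:], count)
--     else:
--         return count
--
-- def count_dots(block):
--     return count_dots_recursive(block, 0)
--
-- def get_dots(block):
--     block_len = len(block)
--     dot_lens = {}
--     i = 0
--     while True:
--         if i >= block_len:
--             break
--
--         val = block[i]
--
--         if val == ".":
--             num_dots = count_dots(block[i:])
--             dot_lens[i] = num_dots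
--             i += num_dots
--         else:
--             i += 1
--
--     return dot_lens
-- ===== SOURCE B (Python) =====
-- def get_dots(block):
--     dot_lens = {}
--     run_start = None
--     for i, ch in enumerate(block):
--         if ch == ".":
--             if run_start is None:
--                 run_start = i
--         elif run_start is not None:
--             dot_lens[run_start] = i - run_start
--             run_start = None
--     if run_start is not None:
--         dot_lens[run_start] = len(block) - run_start
--     return dot_lens
-- ===== Notes on version B (the rewrite author's own statement) =====
-- stated objective: alternative
-- what changed: Replaced the while-loop that re-slices the string and recursively recounts the leading dots of each suffix with a single left-to-right scan that tracks the start of the current dot run and closes it when it ends.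
import Mathlib
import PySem

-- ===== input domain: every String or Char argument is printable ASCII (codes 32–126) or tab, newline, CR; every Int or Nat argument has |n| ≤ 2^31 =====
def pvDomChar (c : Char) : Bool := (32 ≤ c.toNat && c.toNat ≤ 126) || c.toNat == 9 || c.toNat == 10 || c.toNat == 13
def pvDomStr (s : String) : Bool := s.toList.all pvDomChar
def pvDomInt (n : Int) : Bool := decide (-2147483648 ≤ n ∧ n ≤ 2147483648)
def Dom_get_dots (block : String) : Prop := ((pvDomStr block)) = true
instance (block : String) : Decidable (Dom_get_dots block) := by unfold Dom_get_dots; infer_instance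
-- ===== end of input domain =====

-- B: one left-to-right scan tracking the current dot-run start, instead of A's while-loop that re-slices and recounts each suffix.

-- ===== PORT A =====
-- count_dots_recursive(block, count)
def countDotsRec : List Char → Int → Int
  | [], count => count
  | c :: rest, count => if c = '.' then countDotsRec rest (count + 1) else count

-- count_dots(block)
def countDots (l : List Char) : Int := countDotsRec l 0

-- termination helper for the while loop (the accumulator never decreases)
theorem countDotsRec_ge : ∀ (l : List Char) (k : Int), k ≤ countDotsRec l k
  | [], k => le_refl k
  | c :: rest, k => by
    simp only [countDotsRec]
    split
    · exact le_trans (by omega) (countDotsRec_ge rest (k + 1))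
    · exact le_refl k

-- the while loop of get_dots: l is block[i:], i the absolute index, d = dot_lens
def getDotsLoop : List Char → Int → PySem.Dict Int Int → PySem.Dict Int Int
  | [], _, d => d
  | c :: rest, i, d =>
    if h : c = '.' then
      let numDots := countDots (c :: rest)
      getDotsLoop ((c :: rest).drop numDots.toNat) (i + numDots) (d.insert i numDots)
    else
      getDotsLoop rest (i + 1) d
termination_by l => l.length
decreasing_by
  · have h1 : 1 ≤ countDotsRec rest 1 := countDotsRec_ge rest 1
    have h2 : 1 ≤ (countDots (c :: rest)).toNat := by
      rw [show countDots (c :: rest) = countDotsRec rest 1 from by simp [countDots, countDotsRec, h]]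
      omega
    simp only [List.length_drop, List.length_cons]; omega
  · simp

def get_dots (block : String) : List (Int × Int) :=
  (getDotsLoop block.toList 0 PySem.Dict.empty).items

-- ===== PORT B =====
-- single pass: state = start of the current dot run (None if not inside one)
def getDotsScan : List Char → Int → Option Int → List (Int × Int)
  | [], _, none => []
  | [], i, some s => [(s, i - s)]
  | c :: rest, i, st =>
    if c = '.' then
      getDotsScan rest (i + 1) (match st with | none => some i | some s => some s)
    else
      match st with
      | none => getDotsScan rest (i + 1) none
      | some s => (s, i - s) :: getDotsScan rest (i + 1) none

def get_dots_alt (block : String) : List (Int × Int) :=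
  getDotsScan block.toList 0 none

-- ===== PRECONDITION & SPEC =====
def Spec_get_dots (block : String) (out : List (Int × Int)) : Prop := out = get_dots_alt block
instance (block : String) (out : List (Int × Int)) : Decidable (Spec_get_dots block out) := by unfold Spec_get_dots; infer_instance

-- ===== CLAIM (what is proved, stated in full; the proofs are below) =====
def Claim_equal_get_dots : Prop := ∀ (block : String), Dom_get_dots block → Spec_get_dots block (get_dots block)

-- ===== LEMMAS AND PROOFS =====

-- number of leading dots
def leadDots (l : List Char) : Nat := (l.takeWhile (fun c => c = '.')).length

theorem countDotsRec_eq : ∀ (l : List Char) (k : Int), countDotsRec l k = k + (leadDots l : Int)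
  | [], k => by simp [countDotsRec, leadDots]
  | c :: rest, k => by
    by_cases h : c = '.'
    · simp [countDotsRec, h, leadDots, List.takeWhile, countDotsRec_eq rest (k + 1)]
      ring
    · simp [countDotsRec, h, leadDots, List.takeWhile]

theorem countDots_eq (l : List Char) : countDots l = (leadDots l : Int) := by
  simp [countDots, countDotsRec_eq, leadDots]

theorem leadDots_cons_dot (rest : List Char) : leadDots ('.' :: rest) = leadDots rest + 1 := by
  simp [leadDots, List.takeWhile]

theorem leadDots_cons_ne {c : Char} (h : ¬ c = '.') (rest : List Char) :
    leadDots (c :: rest) = 0 := by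
  simp [leadDots, List.takeWhile, h]

-- the scan with an open run emits (s, distance so far + remaining leading dots), then resumes clean
theorem getDotsScan_some : ∀ (l : List Char) (i s : Int),
    getDotsScan l i (some s) =
      (s, i - s + (leadDots l : Int)) :: getDotsScan (l.drop (leadDots l)) (i + (leadDots l : Int)) none
  | [], i, s => by simp [getDotsScan, leadDots]
  | c :: rest, i, s => by
    by_cases h : c = '.'
    · subst h
      rw [show getDotsScan ('.' :: rest) i (some s) = getDotsScan rest (i + 1) (some s) from by
            simp [getDotsScan]]
      rw [getDotsScan_some rest (i + 1) s, leadDots_cons_dot]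
      push_cast
      rw [List.drop_succ_cons,
        show i + 1 - s + ((leadDots rest : Int)) = i - s + ((leadDots rest : Int) + 1) from by ring,
        show i + 1 + ((leadDots rest : Int)) = i + ((leadDots rest : Int) + 1) from by ring]
    · rw [leadDots_cons_ne h]
      simp only [Nat.cast_zero, add_zero, List.drop_zero]
      simp [getDotsScan, h]

-- main invariant: the loop appends exactly what the clean scan of the suffix produces
theorem loop_eq : ∀ (n : Nat) (l : List Char), l.length ≤ n → ∀ (i : Int) (d : PySem.Dict Int Int),
    (∀ k ∈ d.keys, k < i) →
    (getDotsLoop l i d).items = d.items ++ getDotsScan l i none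
  | 0, [], _, i, d, _ => by simp [getDotsLoop, getDotsScan]
  | Nat.succ n, [], _, i, d, _ => by simp [getDotsLoop, getDotsScan]
  | Nat.succ n, c :: rest, hlen, i, d, hk => by
    by_cases h : c = '.'
    · subst h
      have hlead := leadDots_cons_dot rest
      have hnum : countDots ('.' :: rest) = (leadDots ('.' :: rest) : Int) := countDots_eq _
      have hpos : 1 ≤ leadDots ('.' :: rest) := by omega
      have hnc : d.contains i = false := by
        rw [PySem.Dict.contains_eq_decide_mem_keys]
        simp only [decide_eq_false_iff_not]
        intro hmem
        exact absurd (hk i hmem) (lt_irrefl i)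
      rw [show getDotsLoop ('.' :: rest) i d =
            getDotsLoop (('.' :: rest).drop (countDots ('.' :: rest)).toNat)
              (i + countDots ('.' :: rest)) (d.insert i (countDots ('.' :: rest))) from by
            rw [getDotsLoop]; simp]
      have hdroplen : (('.' :: rest).drop (countDots ('.' :: rest)).toNat).length ≤ n := by
        simp only [List.length_drop]
        have : (countDots ('.' :: rest)).toNat = leadDots ('.' :: rest) := by omega
        simp only [this]
        simp only [List.length_cons] at hlen ⊢
        omega
      have hk' : ∀ k ∈ (d.insert i (countDots ('.' :: rest))).keys, k < i + countDots ('.' :: rest) := by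
        intro k hkmem
        rw [PySem.Dict.mem_keys_insert] at hkmem
        rcases hkmem with rfl | hkmem
        · omega
        · have := hk k hkmem; omega
      rw [loop_eq n _ hdroplen _ _ hk']
      rw [PySem.Dict.items_insert_of_not_contains _ _ hnc]
      rw [show getDotsScan ('.' :: rest) i none = getDotsScan rest (i + 1) (some i) from by
            simp [getDotsScan]]
      rw [getDotsScan_some rest (i + 1) i]
      have hdrop : (('.' :: rest).drop (countDots ('.' :: rest)).toNat) = rest.drop (leadDots rest) := by
        have : (countDots ('.' :: rest)).toNat = leadDots ('.' :: rest) := by omega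
        simp [this, hlead, List.drop_succ_cons]
      rw [hdrop]
      have hi : i + countDots ('.' :: rest) = i + 1 + (leadDots rest : Int) := by
        rw [hnum, hlead]; push_cast; ring
      rw [hi]
      have hv : i + 1 - i + (leadDots rest : Int) = countDots ('.' :: rest) := by
        rw [hnum, hlead]; push_cast; ring
      rw [hv]
      simp
    · rw [show getDotsLoop (c :: rest) i d = getDotsLoop rest (i + 1) d from by
            rw [getDotsLoop]; simp [h]]
      rw [show getDotsScan (c :: rest) i none = getDotsScan rest (i + 1) none from by
            simp [getDotsScan, h]]
      exact loop_eq n rest (by simp at hlen ⊢; omega) (i + 1) d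
        (fun k hkmem => by have := hk k hkmem; omega)

-- ===== VERDICT (by name: the statement is the Claim_ definition above) =====
theorem get_dots_spec : Claim_equal_get_dots := by
  intro block _
  unfold Spec_get_dots get_dots get_dots_alt
  rw [loop_eq block.toList.length block.toList (le_refl _) 0 PySem.Dict.empty
    (by simp [PySem.Dict.keys_empty])]
  simp [PySem.Dict.empty]
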